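-- pv_equiv track=rewrite | github.com/tngo0508/grokking | two_city_scheduling.py | two_city_scheduling
-- ===== SOURCE A (Python) =====
-- def two_city_scheduling(costs):
--     num_costs = len(costs)
--     cost_difference_list = [[x - y, [x, y]] for x, y in costs]
--     cost_difference_list.sort()
--
--     i = 0
--     result = 0
--
--     # Add costs of the first half
--     while i < num_costs:
--         cost1, cost2 = cost_difference_list[i][1]
--         if i < num_costs // 2:
--             result += cost1
--         else:
--             result += cost2
--         i += 1
--
--     return result
-- ===== SOURCE B (Python) =====
-- def _sum_smallest(xs, k):
--     # sum of the k smallest elements of xs, by quickselect-style partitioning (no sort)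
--     if k <= 0:
--         return 0
--     if k >= len(xs):
--         return sum(xs)
--     p = xs[0]
--     lt = [a for a in xs if a < p]
--     eq = [a for a in xs if a == p]
--     gt = [a for a in xs if a > p]
--     if k <= len(lt):
--         return _sum_smallest(lt, k)
--     if k <= len(lt) + len(eq):
--         return sum(lt) + p * (k - len(lt))
--     return sum(lt) + sum(eq) + _sum_smallest(gt, k - len(lt) - len(eq))
--
--
-- def two_city_scheduling(costs):
--     # everyone pays their second-city cost; the n//2 people with the smallest
--     # difference x - y additionally pay that difference (x = y + (x - y)).
--     total = 0
--     diffs = []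
--     for x, y in costs:
--         total += y
--         diffs.append(x - y)
--     return total + _sum_smallest(diffs, len(costs) // 2)
-- ===== Notes on version B (the rewrite author's own statement) =====
-- stated objective: alternative
-- what changed: Replaces A's sort of [diff,[x,y]] records plus a branching index loop by a no-sort algorithm: one accumulating pass collects the total of second costs and the differences, and a quickselect-style recursive three-way partition sums the n//2 smallest differences directly.
import Mathlib
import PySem

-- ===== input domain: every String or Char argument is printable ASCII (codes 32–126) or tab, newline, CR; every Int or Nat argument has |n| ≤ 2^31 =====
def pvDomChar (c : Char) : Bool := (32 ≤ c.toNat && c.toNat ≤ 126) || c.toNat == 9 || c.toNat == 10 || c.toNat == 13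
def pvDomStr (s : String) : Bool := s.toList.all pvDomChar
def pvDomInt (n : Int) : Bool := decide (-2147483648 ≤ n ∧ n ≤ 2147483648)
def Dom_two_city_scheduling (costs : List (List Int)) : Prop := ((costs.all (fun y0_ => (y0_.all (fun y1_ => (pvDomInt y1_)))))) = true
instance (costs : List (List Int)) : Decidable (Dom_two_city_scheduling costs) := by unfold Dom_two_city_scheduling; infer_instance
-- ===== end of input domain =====

-- B replaces A's sort-then-branching-loop by a no-sort alternative: one accumulating pass
-- over costs plus a quickselect-style three-way partition summing the n//2 smallest differences.


-- ===== PORT A =====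
-- `for x, y in costs` unpacking is ported as c[0], c[1]; exact under Pre_ (each inner list
-- has length 2; Python raises ValueError otherwise).
-- Python's list.sort() compares the records [d, [x, y]] lexicographically; since y = x - d,
-- the tuple key (d, x) resolves every comparison identically (elements tying on (d, x) are
-- equal records), so sorted2 with keys d and x is exact.
def two_city_scheduling (costs : List (List Int)) : Int :=
  let num_costs : Int := PySem.List.len costs
  let cost_difference_list : List (Int × Int × Int) :=
    costs.map (fun c => (c.getD 0 0 - c.getD 1 0, c.getD 0 0, c.getD 1 0))
  let lst := PySem.List.sorted2 cost_difference_list (fun e => e.1) (fun e => e.2.1)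
  (PySem.List.pyRange 0 num_costs).foldl
    (fun result i =>
      if i < PySem.Int.floordiv num_costs 2 then
        result + (PySem.List.pyGetD lst i (0, 0, 0)).2.1
      else
        result + (PySem.List.pyGetD lst i (0, 0, 0)).2.2) 0

-- ===== PORT B =====
-- the three comprehensions of Source B's _sum_smallest, as named helpers
def pvFilterLt (p : Int) (xs : List Int) : List Int := xs.filter (fun a => a < p)
def pvFilterEq (p : Int) (xs : List Int) : List Int := xs.filter (fun a => a = p)
def pvFilterGt (p : Int) (xs : List Int) : List Int := xs.filter (fun a => p < a)

-- termination facts for the recursion (the pivot itself never lands in lt / gt)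
theorem pvFilterLt_length_lt (xs : List Int) (h : xs ≠ []) :
    (pvFilterLt (PySem.List.pyGetD xs 0 0) xs).length < xs.length := by
  rcases xs with _ | ⟨a, t⟩
  · exact absurd rfl h
  · refine List.length_filter_lt_length_iff_exists.mpr ⟨a, List.mem_cons_self, ?_⟩
    simp [PySem.List.pyGetD, PySem.List.pyGet?, PySem.List.pyIdx?]

theorem pvFilterGt_length_lt (xs : List Int) (h : xs ≠ []) :
    (pvFilterGt (PySem.List.pyGetD xs 0 0) xs).length < xs.length := by
  rcases xs with _ | ⟨a, t⟩
  · exact absurd rfl h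
  · refine List.length_filter_lt_length_iff_exists.mpr ⟨a, List.mem_cons_self, ?_⟩
    simp [PySem.List.pyGetD, PySem.List.pyGet?, PySem.List.pyIdx?]

-- port of Source B's _sum_smallest: quickselect-style recursion; xs[0] is only read when
-- 0 < k < len xs, so pyGetD with a default is exact there
def pvSumSmallest (xs : List Int) (k : Int) : Int :=
  if k ≤ 0 then 0
  else if PySem.List.len xs ≤ k then xs.sum
  else
    let p := PySem.List.pyGetD xs 0 0
    let lt := pvFilterLt p xs
    let eq := pvFilterEq p xs
    let gt := pvFilterGt p xs
    if k ≤ PySem.List.len lt then pvSumSmallest lt k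
    else if k ≤ PySem.List.len lt + PySem.List.len eq then
      lt.sum + p * (k - PySem.List.len lt)
    else lt.sum + eq.sum + pvSumSmallest gt (k - PySem.List.len lt - PySem.List.len eq)
termination_by xs.length
decreasing_by
  · rename_i h1 h2 _
    refine pvFilterLt_length_lt xs fun hnil => ?_
    rw [hnil] at h2; simp [PySem.List.len] at h2; omega
  · rename_i h1 h2 _ _
    refine pvFilterGt_length_lt xs fun hnil => ?_
    rw [hnil] at h2; simp [PySem.List.len] at h2; omega

-- unpacking ported as c[0], c[1] (exact under Pre_, as for A)
def two_city_scheduling_alt (costs : List (List Int)) : Int :=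
  let td := costs.foldl
    (fun (acc : Int × List Int) c =>
      (acc.1 + c.getD 1 0, acc.2 ++ [c.getD 0 0 - c.getD 1 0])) (0, [])
  td.1 + pvSumSmallest td.2 (PySem.Int.floordiv (PySem.List.len costs) 2)

-- ===== PRECONDITION & SPEC =====
-- Pre_ excludes exactly the inputs where both Pythons raise ValueError: an inner list that
-- is not a pair cannot be unpacked by `x, y = …`.
def Pre_two_city_scheduling (costs : List (List Int)) : Prop :=
  ∀ c ∈ costs, c.length = 2
instance (costs : List (List Int)) : Decidable (Pre_two_city_scheduling costs) := by
  unfold Pre_two_city_scheduling; infer_instance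
def pvWitness_two_city_scheduling : List (List Int) := [[10, 20], [30, 200], [400, 50], [30, 20]]

def Spec_two_city_scheduling (costs : List (List Int)) (out : Int) : Prop := out = two_city_scheduling_alt costs
instance (costs : List (List Int)) (out : Int) : Decidable (Spec_two_city_scheduling costs out) := by unfold Spec_two_city_scheduling; infer_instance

-- ===== CLAIM (what is proved, stated in full; the proofs are below) =====
def Claim_equal_two_city_scheduling : Prop := ∀ (costs : List (List Int)), Dom_two_city_scheduling costs → Pre_two_city_scheduling costs → Spec_two_city_scheduling costs (two_city_scheduling costs)

-- ===== LEMMAS AND PROOFS =====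

-- inserting into a list that is nondecreasing under k keeps it nondecreasing under k,
-- whenever the boolean `before` decides at least a k-order
theorem insertBy_pairwise_key {α : Type} (k : α → Int) (before : α → α → Bool)
    (hT : ∀ a b, before a b = true → k a ≤ k b)
    (hF : ∀ a b, before a b = false → k b ≤ k a)
    (x : α) (acc : List α) (h : acc.Pairwise (fun a b => k a ≤ k b)) :
    (PySem.List.insertBy before x acc).Pairwise (fun a b => k a ≤ k b) := by
  induction acc with
  | nil => simp [PySem.List.insertBy]
  | cons y ys ih =>
    rw [List.pairwise_cons] at h
    by_cases hb : before x y = true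
    · simp only [PySem.List.insertBy, hb, if_true]
      refine List.Pairwise.cons ?_ (List.Pairwise.cons h.1 h.2)
      intro z hz
      rcases List.mem_cons.mp hz with rfl | hz
      · exact hT _ _ hb
      · exact le_trans (hT _ _ hb) (h.1 z hz)
    · simp only [PySem.List.insertBy, hb]
      refine List.Pairwise.cons ?_ (ih h.2)
      intro z hz
      rcases (PySem.List.mem_insertBy _ _ _ _).mp hz with rfl | hz
      · exact hF _ _ (Bool.eq_false_iff.mpr hb)
      · exact h.1 z hz

theorem foldl_insertBy_pairwise_key {α : Type} (k : α → Int) (before : α → α → Bool)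
    (hT : ∀ a b, before a b = true → k a ≤ k b)
    (hF : ∀ a b, before a b = false → k b ≤ k a)
    (xs : List α) (acc : List α) (h : acc.Pairwise (fun a b => k a ≤ k b)) :
    (xs.foldl (fun acc x => PySem.List.insertBy before x acc) acc).Pairwise
      (fun a b => k a ≤ k b) := by
  induction xs generalizing acc with
  | nil => exact h
  | cons x xs ih =>
    exact ih _ (insertBy_pairwise_key k before hT hF x acc h)

-- the first components of A's sorted record list are nondecreasing
theorem sorted2_fst_pairwise (xs : List (Int × Int × Int)) :
    (PySem.List.sorted2 xs (fun e => e.1) (fun e => e.2.1)).Pairwise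
      (fun a b => a.1 ≤ b.1) := by
  have := foldl_insertBy_pairwise_key (α := Int × Int × Int) (fun e => e.1)
    (fun a b => decide (a.1 < b.1) || (!decide (b.1 < a.1) && decide (a.2.1 < b.2.1)))
    (by intro a b hab; simp at hab; show a.1 ≤ b.1; omega)
    (by intro a b hab; simp at hab; show b.1 ≤ a.1; omega)
    xs [] List.Pairwise.nil
  simpa [PySem.List.sorted2] using this

-- every element of the eq-part of the partition is the pivot
theorem pvFilterEq_mem {p b : Int} {xs : List Int} (hb : b ∈ pvFilterEq p xs) : b = p := by
  rw [pvFilterEq, List.mem_filter] at hb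
  simpa using hb.2

-- the three-way partition at a pivot is a permutation of the list (counting argument)
theorem perm_partition3 (p : Int) (xs : List Int) :
    xs.Perm (pvFilterLt p xs ++ (pvFilterEq p xs ++ pvFilterGt p xs)) := by
  refine List.perm_iff_count.mpr fun a => ?_
  have hz : ∀ q : Int → Bool, q a = false → (List.filter q xs).count a = 0 := by
    intro q hq
    refine List.count_eq_zero.mpr fun hmem => ?_
    have := (List.mem_filter.mp hmem).2
    simp [hq] at this
  simp only [List.count_append, pvFilterLt, pvFilterEq, pvFilterGt]
  rcases lt_trichotomy a p with h | h | h
  · rw [List.count_filter (by simpa using h), hz _ (by simpa using h.ne),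
      hz _ (by simpa using not_lt.mpr h.le)]
    omega
  · rw [hz _ (by simp [h]), List.count_filter (by simpa using h), hz _ (by simp [h])]
    omega
  · rw [hz _ (by simpa using not_lt.mpr h.le), hz _ (by simpa using h.ne'),
      List.count_filter (by simpa using h)]
    omega

-- sorting a list is sorting the below-pivot part, then the pivot copies, then the above part
theorem sorted_partition3 (p : Int) (xs : List Int) :
    PySem.List.sorted xs (fun d => d)
      = PySem.List.sorted (pvFilterLt p xs) (fun d => d)
        ++ (pvFilterEq p xs ++ PySem.List.sorted (pvFilterGt p xs) (fun d => d)) := by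
  apply PySem.List.sorted_id_eq_of_perm_of_pairwise
  · exact ((PySem.List.sorted_perm _ _ false).append
      ((List.Perm.refl _).append (PySem.List.sorted_perm _ _ false))).trans
      (perm_partition3 p xs).symm
  · have hltmem : ∀ a ∈ PySem.List.sorted (pvFilterLt p xs) (fun d => d), a < p := by
      intro a ha
      rw [PySem.List.mem_sorted, pvFilterLt, List.mem_filter] at ha
      simpa using ha.2
    have hgtmem : ∀ a ∈ PySem.List.sorted (pvFilterGt p xs) (fun d => d), p < a := by
      intro a ha
      rw [PySem.List.mem_sorted, pvFilterGt, List.mem_filter] at ha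
      simpa using ha.2
    rw [List.pairwise_append]
    refine ⟨PySem.List.sorted_pairwise _ _, ?_, ?_⟩
    · rw [List.pairwise_append]
      refine ⟨?_, PySem.List.sorted_pairwise _ _, ?_⟩
      · rw [List.eq_replicate_of_mem (fun b hb => pvFilterEq_mem hb)]
        exact List.pairwise_replicate.mpr (Or.inr le_rfl)
      · intro a ha b hb
        rw [pvFilterEq_mem ha]
        exact (hgtmem b hb).le
    · intro a ha b hb
      rcases List.mem_append.mp hb with hb | hb
      · rw [pvFilterEq_mem hb]
        exact (hltmem a ha).le
      · exact ((hltmem a ha).trans (hgtmem b hb)).le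

-- the quickselect recursion computes the sum of the first k elements of the sorted list
theorem pvSumSmallest_eq_take_sorted (xs : List Int) (k : Int) :
    pvSumSmallest xs k = ((PySem.List.sorted xs (fun d => d)).take k.toNat).sum := by
  induction xs, k using pvSumSmallest.induct with
  | case1 xs k hk =>
    rw [pvSumSmallest.eq_def, if_pos hk, Int.toNat_of_nonpos hk]
    simp
  | case2 xs k hk hlen =>
    rw [pvSumSmallest.eq_def, if_neg hk, if_pos hlen]
    rw [PySem.List.len_eq] at hlen
    rw [List.take_of_length_le (by rw [PySem.List.length_sorted]; omega)]
    exact ((PySem.List.sorted_perm xs _ false).sum_eq).symm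
  | case3 xs k hk hlen p lt hkle ih =>
    rw [pvSumSmallest.eq_def, if_neg hk, if_neg hlen]
    dsimp only []
    rw [show PySem.List.pyGetD xs 0 0 = p from rfl]
    rw [show pvFilterLt p xs = lt from rfl]
    rw [if_pos hkle, ih, sorted_partition3 p xs]
    rw [show pvFilterLt p xs = lt from rfl]
    simp only [PySem.List.len_eq] at hkle
    rw [List.take_append_of_le_length (by rw [PySem.List.length_sorted]; omega)]
  | case4 xs k hk hlen p lt eqq h3 h4 =>
    rw [pvSumSmallest.eq_def, if_neg hk, if_neg hlen]
    dsimp only []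
    rw [show PySem.List.pyGetD xs 0 0 = p from rfl]
    rw [show pvFilterLt p xs = lt from rfl, show pvFilterEq p xs = eqq from rfl]
    rw [if_neg h3, if_pos h4]
    rw [sorted_partition3 p xs, List.take_append, List.take_append]
    rw [show pvFilterLt p xs = lt from rfl, show pvFilterEq p xs = eqq from rfl]
    simp only [PySem.List.len_eq] at h3 h4 ⊢
    simp only [PySem.List.length_sorted]
    rw [List.take_of_length_le (by rw [PySem.List.length_sorted]; omega)]
    rw [List.eq_replicate_of_mem (l := eqq) (fun b hb => pvFilterEq_mem hb)]
    simp only [List.take_replicate, List.length_replicate]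
    rw [min_eq_left (by omega)]
    rw [show k.toNat - lt.length - eqq.length = 0 from by omega]
    simp only [List.take_zero, List.append_nil, List.sum_append, List.sum_replicate]
    rw [(PySem.List.sorted_perm lt (fun d => d) false).sum_eq]
    rw [nsmul_eq_mul]
    rw [show ((k.toNat - lt.length : ℕ) : ℤ) = k - (lt.length : ℤ) from by omega]
    ring
  | case5 xs k hk hlen p lt eqq gt h3 h4 ih =>
    rw [pvSumSmallest.eq_def, if_neg hk, if_neg hlen]
    dsimp only []
    rw [show PySem.List.pyGetD xs 0 0 = p from rfl]
    rw [show pvFilterLt p xs = lt from rfl, show pvFilterEq p xs = eqq from rfl,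
      show pvFilterGt p xs = gt from rfl]
    rw [if_neg h3, if_neg h4, ih]
    rw [sorted_partition3 p xs, List.take_append, List.take_append]
    rw [show pvFilterLt p xs = lt from rfl, show pvFilterEq p xs = eqq from rfl,
      show pvFilterGt p xs = gt from rfl]
    simp only [PySem.List.len_eq] at h3 h4 ⊢
    simp only [PySem.List.length_sorted]
    rw [List.take_of_length_le (l := PySem.List.sorted lt (fun d => d)) (i := k.toNat)
      (by rw [PySem.List.length_sorted]; omega)]
    rw [List.take_of_length_le (l := eqq) (i := k.toNat - lt.length) (by omega)]
    simp only [List.sum_append]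
    rw [(PySem.List.sorted_perm lt (fun d => d) false).sum_eq]
    rw [show (k - (lt.length : ℤ) - (eqq.length : ℤ)).toNat
        = k.toNat - lt.length - eqq.length from by omega]
    ring

-- B's accumulating pass computes the sum of second costs and the list of differences
theorem pvFoldTD (costs : List (List Int)) (t : Int) (d : List Int) :
    costs.foldl
      (fun (acc : Int × List Int) c =>
        (acc.1 + c.getD 1 0, acc.2 ++ [c.getD 0 0 - c.getD 1 0])) (t, d)
    = (t + (costs.map (fun c => c.getD 1 0)).sum,
       d ++ costs.map (fun c => c.getD 0 0 - c.getD 1 0)) := by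
  induction costs generalizing t d with
  | nil => simp
  | cons c cs ih =>
    simp only [List.foldl_cons]
    rw [ih]
    simp [add_assoc]

-- B's value, in closed form: total of second costs plus the smallest-half prefix sum
theorem alt_closed (costs : List (List Int)) :
    two_city_scheduling_alt costs
      = (costs.map (fun c => c.getD 1 0)).sum
        + ((PySem.List.sorted (costs.map (fun c => c.getD 0 0 - c.getD 1 0)) (fun d => d)).take
            (costs.length / 2)).sum := by
  unfold two_city_scheduling_alt
  rw [pvFoldTD]
  simp only [zero_add, List.nil_append]
  rw [pvSumSmallest_eq_take_sorted, PySem.List.len_eq]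
  rw [show PySem.Int.floordiv (costs.length : Int) 2 = ((costs.length / 2 : Nat) : Int) from by
    exact_mod_cast PySem.Int.floordiv_natCast costs.length 2]
  rw [Int.toNat_natCast]

-- ===== VERDICT (by name: the statement is the Claim_ definition above) =====
theorem two_city_scheduling_spec : Claim_equal_two_city_scheduling := by
  intro costs _ _
  unfold Spec_two_city_scheduling
  rw [alt_closed]
  unfold two_city_scheduling
  simp only [PySem.List.len_eq]
  set cdl := costs.map (fun c => (c.getD 0 0 - c.getD 1 0, c.getD 0 0, c.getD 1 0)) with hcdl
  set L := PySem.List.sorted2 cdl (fun e => e.1) (fun e => e.2.1) with hLdef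
  have hperm : L.Perm cdl := PySem.List.sorted2_perm cdl _ _ false
  have hlen : L.length = costs.length := by
    rw [hperm.length_eq, hcdl, List.length_map]
  set n := costs.length with hn
  set h := n / 2 with hh
  have hfd : PySem.Int.floordiv (n : Int) 2 = ((h : Nat) : Int) := by
    exact_mod_cast PySem.Int.floordiv_natCast n 2
  have hhn : h ≤ n := Nat.div_le_self _ _
  simp only [← hn, hfd]
  rw [PySem.List.pyRange_one_append 0 (h : Int) (n : Int) (by positivity) (by exact_mod_cast hhn)]
  rw [List.foldl_append]
  have hlent : (L.take h).length = h := by rw [List.length_take, hlen]; omega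
  -- first half of the loop: adds the x-component of the first h sorted records
  have e1 : ∀ init : Int,
      (PySem.List.pyRange 0 (h : Int)).foldl
        (fun result i =>
          if i < ((h : Nat) : Int) then result + (PySem.List.pyGetD L i (0, 0, 0)).2.1
          else result + (PySem.List.pyGetD L i (0, 0, 0)).2.2) init
      = init + ((L.take h).map (fun e => e.2.1)).sum := by
    intro init
    rw [PySem.List.foldl_congr_mem _ _
      (fun result i => result + (PySem.List.pyGetD (L.take h) i (0, 0, 0)).2.1) init ?_]
    · have : (h : Int) = PySem.List.len (L.take h) := by
        rw [PySem.List.len_eq, hlent]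
      rw [this, PySem.List.foldl_pyRange_zero_pyGetD (L.take h) (0,0,0)
        (fun result e => result + e.2.1) init, PySem.List.foldl_add]
    · intro acc i hi
      obtain ⟨h0, h1⟩ := PySem.List.mem_pyRange_one.mp hi
      dsimp only
      rw [if_pos h1,
        PySem.List.pyGetD_eq_getElem L (0,0,0) h0 (by rw [hlen]; omega),
        PySem.List.pyGetD_eq_getElem (L.take h) (0,0,0) h0 (by rw [hlent]; omega),
        List.getElem_take]
  -- second half of the loop: adds the y-component of the remaining records
  have e2 : ∀ init : Int,
      (PySem.List.pyRange (h : Int) (n : Int)).foldl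
        (fun result i =>
          if i < ((h : Nat) : Int) then result + (PySem.List.pyGetD L i (0, 0, 0)).2.1
          else result + (PySem.List.pyGetD L i (0, 0, 0)).2.2) init
      = init + ((L.drop h).map (fun e => e.2.2)).sum := by
    intro init
    rw [PySem.List.foldl_congr_mem _ _
      (fun result i => result + (PySem.List.pyGetD L i (0, 0, 0)).2.2) init ?_]
    · have : (n : Int) = PySem.List.len L := by rw [PySem.List.len_eq, hlen]
      rw [this, PySem.List.foldl_pyRange_pyGetD L (0,0,0)
        (fun result e => result + e.2.2) init (a := (h : Int)) (by positivity),
        Int.toNat_natCast, PySem.List.foldl_add]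
    · intro acc i hi
      obtain ⟨h0, h1⟩ := PySem.List.mem_pyRange_one.mp hi
      dsimp only
      rw [if_neg (by omega)]
  rw [e1 0, e2]
  -- every record satisfies d = x - y
  have hmem : ∀ e ∈ L, e.1 = e.2.1 - e.2.2 := by
    intro e he
    obtain ⟨c, _, rfl⟩ := List.mem_map.mp (hperm.mem_iff.mp he)
    simp
  -- the x-cost of a first-half record is its y-cost plus its difference
  have hx : ((L.take h).map (fun e => e.2.1)).sum
      = ((L.take h).map (fun e => e.2.2)).sum + ((L.take h).map (fun e => e.1)).sum := by
    rw [← PySem.List.sum_map_add_int]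
    refine congrArg List.sum (List.map_congr_left ?_)
    intro e he
    have := hmem e (List.mem_of_mem_take he)
    omega
  -- B's sorted difference list is exactly the first components of A's sorted records
  have hdiffs : PySem.List.sorted (costs.map (fun c => c.getD 0 0 - c.getD 1 0)) (fun d => d)
      = L.map (fun e => e.1) := by
    apply PySem.List.sorted_id_eq_of_perm_of_pairwise
    · refine (hperm.map _).trans ?_
      rw [hcdl, List.map_map]
      exact List.Perm.refl _
    · exact List.pairwise_map.mpr (sorted2_fst_pairwise cdl)
  have htot : (costs.map (fun c => c.getD 1 0)).sum = (L.map (fun e => e.2.2)).sum := by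
    have := (hperm.map (fun e => e.2.2)).sum_eq
    rw [hcdl, List.map_map] at this
    exact this.symm
  rw [hdiffs, htot, hx, ← List.map_take (f := fun e : Int × Int × Int => e.1)]
  have hsplit : ((L.take h).map (fun e => e.2.2)).sum + ((L.drop h).map (fun e => e.2.2)).sum
      = (L.map (fun e => e.2.2)).sum := by
    rw [List.map_take, List.map_drop, List.sum_take_add_sum_drop]
  omega
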